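-- pv_equiv track=rewrite | github.com/HeinekenBottle/IRONFORGE | multi_agent_systems/cascade_event_orchestrator_agent.py | _group_similar_sequences
-- ===== SOURCE A (Python) =====
-- from typing import Dict, List, Tuple, Optional
--
-- def _group_similar_sequences(sequences: List[Dict]) -> Dict[str, List[Dict]]:
--     """Group similar cascade sequences to identify common patterns"""
--
--     # Simple grouping based on event counts - can be enhanced with clustering
--     groups = {
--         'liquidity_dominant': [],
--         'fvg_dominant': [],
--         'mixed_pattern': [],
--         'displacement_dominant': []
--     }
--
--     for seq in sequences:
--         metrics = seq.get('sequence_metrics', {}) or {}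
--         liquidity_count = metrics.get('liquidity_events_count') or 0
--         fvg_count = metrics.get('fvg_events_count') or 0
--         displacement_count = metrics.get('displacement_events_count') or 0
--
--         # Classify based on dominant event type
--         if liquidity_count > fvg_count and liquidity_count > displacement_count:
--             groups['liquidity_dominant'].append(seq)
--         elif fvg_count > liquidity_count and fvg_count > displacement_count:
--             groups['fvg_dominant'].append(seq)
--         elif displacement_count > liquidity_count and displacement_count > fvg_count:
--             groups['displacement_dominant'].append(seq)
--         else:
--             groups['mixed_pattern'].append(seq)
--
--     return groups
-- ===== SOURCE B (Python) =====
-- from typing import Dict, List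
--
-- def _group_similar_sequences(sequences: List[Dict]) -> Dict[str, List[Dict]]:
--     """Group similar cascade sequences: rank the three counts by a stable
--     descending sort and bucket via one filter pass per group (staged passes)."""
--
--     def classify(seq):
--         metrics = seq.get('sequence_metrics', {}) or {}
--         ranked = sorted(
--             [('liquidity_dominant', metrics.get('liquidity_events_count') or 0),
--              ('fvg_dominant', metrics.get('fvg_events_count') or 0),
--              ('displacement_dominant', metrics.get('displacement_events_count') or 0)],
--             key=lambda p: p[1], reverse=True)
--         if ranked[0][1] > ranked[1][1]:
--             return ranked[0][0]
--         return 'mixed_pattern'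
--
--     return {key: [seq for seq in sequences if classify(seq) == key]
--             for key in ('liquidity_dominant', 'fvg_dominant',
--                         'mixed_pattern', 'displacement_dominant')}
-- ===== Notes on version B (the rewrite author's own statement) =====
-- stated objective: alternative
-- what changed: Replaces A's single accumulating pass with an elif cascade by a rank-then-filter design: each sequence is classified via a stable descending sort of the three (name,count) pairs (top strictly above second = winner, else mixed), and the output is built as four separate filter passes over the input, one per bucket, with no mutated accumulator.
import Mathlib
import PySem

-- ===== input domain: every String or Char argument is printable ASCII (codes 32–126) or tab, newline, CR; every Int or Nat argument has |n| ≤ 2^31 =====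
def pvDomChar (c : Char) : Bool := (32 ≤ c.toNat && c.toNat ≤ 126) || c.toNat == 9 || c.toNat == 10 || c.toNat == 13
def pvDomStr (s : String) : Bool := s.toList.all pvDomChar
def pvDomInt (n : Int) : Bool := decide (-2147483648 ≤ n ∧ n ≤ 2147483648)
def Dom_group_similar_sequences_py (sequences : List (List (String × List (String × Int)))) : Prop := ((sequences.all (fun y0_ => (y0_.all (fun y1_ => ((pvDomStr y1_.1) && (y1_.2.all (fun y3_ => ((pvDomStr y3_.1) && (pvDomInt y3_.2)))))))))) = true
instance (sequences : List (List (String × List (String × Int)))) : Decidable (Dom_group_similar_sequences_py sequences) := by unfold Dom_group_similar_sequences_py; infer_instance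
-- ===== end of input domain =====

-- B replaces A's single accumulating pass with an elif cascade by rank-then-filter:
-- a stable descending sort of the three (name, count) pairs classifies each sequence,
-- and the four buckets are built by four separate filter passes; objective: alternative.

-- ===== PORT A =====
-- metrics = seq.get('sequence_metrics', {}) or {}        (identical line in both Pythons, shared)
def pvMetricsOf (seq : List (String × List (String × Int))) : List (String × Int) :=
  let metrics := (PySem.Dict.mk seq).getD "sequence_metrics" []
  if metrics = [] then [] else metrics   -- 'or {}': an empty dict is falsy

-- metrics.get(k) or 0        (identical lines in both Pythons, shared)
def pvCountOf (metrics : List (String × Int)) (k : String) : Int :=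
  match (PySem.Dict.mk metrics).get? k with
  | none => 0                        -- None or 0  ==  0
  | some v => if v = 0 then 0 else v -- 'v or 0' on an int is v unless v == 0

def group_similar_sequences_py (sequences : List (List (String × List (String × Int)))) : List (String × List (List (String × List (String × Int)))) :=
  let groups : PySem.Dict String (List (List (String × List (String × Int)))) :=
    PySem.Dict.mk [("liquidity_dominant", []), ("fvg_dominant", []),
                   ("mixed_pattern", []), ("displacement_dominant", [])]
  (sequences.foldl (fun groups seq =>
    let metrics := pvMetricsOf seq
    let liquidity_count := pvCountOf metrics "liquidity_events_count"
    let fvg_count := pvCountOf metrics "fvg_events_count"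
    let displacement_count := pvCountOf metrics "displacement_events_count"
    if liquidity_count > fvg_count ∧ liquidity_count > displacement_count then
      groups.modify "liquidity_dominant" [] (· ++ [seq])   -- groups['liquidity_dominant'].append(seq)
    else if fvg_count > liquidity_count ∧ fvg_count > displacement_count then
      groups.modify "fvg_dominant" [] (· ++ [seq])
    else if displacement_count > liquidity_count ∧ displacement_count > fvg_count then
      groups.modify "displacement_dominant" [] (· ++ [seq])
    else
      groups.modify "mixed_pattern" [] (· ++ [seq])) groups).items

-- ===== PORT B =====
-- classify(seq): stable descending sort of the three (name, count) pairs;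
-- ranked[0]/ranked[1] read by the match (the literal list always has 3 elements,
-- so the catch-all arm is unreachable and only makes the match total)
def pvClassify (seq : List (String × List (String × Int))) : String :=
  let metrics := pvMetricsOf seq
  let ranked := PySem.List.sorted
    [("liquidity_dominant", pvCountOf metrics "liquidity_events_count"),
     ("fvg_dominant", pvCountOf metrics "fvg_events_count"),
     ("displacement_dominant", pvCountOf metrics "displacement_events_count")]
    (fun p => p.2) true
  match ranked with
  | p0 :: p1 :: _ => if p0.2 > p1.2 then p0.1 else "mixed_pattern"
  | _ => "mixed_pattern"

-- {key: [seq for seq in sequences if classify(seq) == key] for key in (…)}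
def group_similar_sequences_py_alt (sequences : List (List (String × List (String × Int)))) : List (String × List (List (String × List (String × Int)))) :=
  [("liquidity_dominant", sequences.filter (fun s => pvClassify s == "liquidity_dominant")),
   ("fvg_dominant", sequences.filter (fun s => pvClassify s == "fvg_dominant")),
   ("mixed_pattern", sequences.filter (fun s => pvClassify s == "mixed_pattern")),
   ("displacement_dominant", sequences.filter (fun s => pvClassify s == "displacement_dominant"))]

-- ===== PRECONDITION & SPEC =====
def Spec_group_similar_sequences_py (sequences : List (List (String × List (String × Int)))) (out : List (String × List (List (String × List (String × Int))))) : Prop := out = group_similar_sequences_py_alt sequences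
instance (sequences : List (List (String × List (String × Int)))) (out : List (String × List (List (String × List (String × Int))))) : Decidable (Spec_group_similar_sequences_py sequences out) := by
  unfold Spec_group_similar_sequences_py
  -- infer_instance alone exceeds the instance-search limits on this deeply nested type,
  -- so the DecidableEq instance is assembled in stages
  have d1 : DecidableEq (List (List (String × List (String × Int)))) := inferInstance
  have d2 : DecidableEq (String × List (List (String × List (String × Int)))) := instDecidableEqProd
  have d3 : DecidableEq (List (String × List (List (String × List (String × Int))))) := @instDecidableEqList _ d2
  exact d3 out (group_similar_sequences_py_alt sequences)

-- ===== CLAIM (what is proved, stated in full; the proofs are below) =====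
def Claim_equal_group_similar_sequences_py : Prop := ∀ (sequences : List (List (String × List (String × Int)))), Dom_group_similar_sequences_py sequences → Spec_group_similar_sequences_py sequences (group_similar_sequences_py sequences)

-- ===== LEMMAS AND PROOFS =====

-- A's elif-cascade key, extracted as a function (proof helper only).
def pvAKey (seq : List (String × List (String × Int))) : String :=
  let metrics := pvMetricsOf seq
  let l := pvCountOf metrics "liquidity_events_count"
  let f := pvCountOf metrics "fvg_events_count"
  let d := pvCountOf metrics "displacement_events_count"
  if l > f ∧ l > d then "liquidity_dominant"
  else if f > l ∧ f > d then "fvg_dominant"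
  else if d > l ∧ d > f then "displacement_dominant"
  else "mixed_pattern"

-- The stable descending 3-sort picks the unique strict maximum (or ties → mixed),
-- which is exactly A's cascade.
theorem pv_rank_eq_chain (n1 n2 n3 : String) (l f d : Int) :
    (match PySem.List.sorted [(n1, l), (n2, f), (n3, d)] (fun p => p.2) true with
     | p0 :: p1 :: _ => if p0.2 > p1.2 then p0.1 else "mixed_pattern"
     | _ => "mixed_pattern")
    = (if l > f ∧ l > d then n1
       else if f > l ∧ f > d then n2
       else if d > l ∧ d > f then n3
       else "mixed_pattern") := by
  simp only [PySem.List.sorted_rev_eq_foldl_insertBy, List.foldl, PySem.List.insertBy]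
  split_ifs <;> simp only [PySem.List.insertBy] <;> split_ifs <;> dsimp only <;> split_ifs <;>
    first
      | rfl
      | (exfalso; simp only [decide_eq_true_eq, not_and, not_lt, gt_iff_lt] at *; omega)

theorem pvClassify_eq_pvAKey (seq : List (String × List (String × Int))) :
    pvClassify seq = pvAKey seq := by
  unfold pvClassify pvAKey
  exact pv_rank_eq_chain _ _ _ _ _ _

theorem pvAKey_cases (seq : List (String × List (String × Int))) :
    pvAKey seq = "liquidity_dominant" ∨ pvAKey seq = "fvg_dominant" ∨
    pvAKey seq = "mixed_pattern" ∨ pvAKey seq = "displacement_dominant" := by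
  unfold pvAKey
  dsimp only
  split_ifs <;> simp

-- A's loop body is 'append to the bucket named by pvAKey'.
theorem pv_stepA (groups : PySem.Dict String (List (List (String × List (String × Int)))))
    (seq : List (String × List (String × Int))) :
    (let metrics := pvMetricsOf seq
     let liquidity_count := pvCountOf metrics "liquidity_events_count"
     let fvg_count := pvCountOf metrics "fvg_events_count"
     let displacement_count := pvCountOf metrics "displacement_events_count"
     if liquidity_count > fvg_count ∧ liquidity_count > displacement_count then
       groups.modify "liquidity_dominant" [] (· ++ [seq])
     else if fvg_count > liquidity_count ∧ fvg_count > displacement_count then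
       groups.modify "fvg_dominant" [] (· ++ [seq])
     else if displacement_count > liquidity_count ∧ displacement_count > fvg_count then
       groups.modify "displacement_dominant" [] (· ++ [seq])
     else
       groups.modify "mixed_pattern" [] (· ++ [seq]))
    = groups.modify (pvAKey seq) [] (· ++ [seq]) := by
  unfold pvAKey
  dsimp only
  split_ifs <;> rfl

-- Dict.modify on the seeded four-key dict, one equation per literal key.
theorem pv_modify_liq (v1 v2 v3 v4 : List (List (String × List (String × Int))))
    (w : List (String × List (String × Int))) :
    (PySem.Dict.mk [("liquidity_dominant", v1), ("fvg_dominant", v2),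
                    ("mixed_pattern", v3), ("displacement_dominant", v4)]).modify
      "liquidity_dominant" [] (· ++ [w])
    = PySem.Dict.mk [("liquidity_dominant", v1 ++ [w]), ("fvg_dominant", v2),
                     ("mixed_pattern", v3), ("displacement_dominant", v4)] := by
  simp [PySem.Dict.modify, PySem.Dict.insert, PySem.Dict.getD, PySem.Dict.get?]

theorem pv_modify_fvg (v1 v2 v3 v4 : List (List (String × List (String × Int))))
    (w : List (String × List (String × Int))) :
    (PySem.Dict.mk [("liquidity_dominant", v1), ("fvg_dominant", v2),
                    ("mixed_pattern", v3), ("displacement_dominant", v4)]).modify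
      "fvg_dominant" [] (· ++ [w])
    = PySem.Dict.mk [("liquidity_dominant", v1), ("fvg_dominant", v2 ++ [w]),
                     ("mixed_pattern", v3), ("displacement_dominant", v4)] := by
  simp [PySem.Dict.modify, PySem.Dict.insert, PySem.Dict.getD, PySem.Dict.get?]

theorem pv_modify_mix (v1 v2 v3 v4 : List (List (String × List (String × Int))))
    (w : List (String × List (String × Int))) :
    (PySem.Dict.mk [("liquidity_dominant", v1), ("fvg_dominant", v2),
                    ("mixed_pattern", v3), ("displacement_dominant", v4)]).modify
      "mixed_pattern" [] (· ++ [w])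
    = PySem.Dict.mk [("liquidity_dominant", v1), ("fvg_dominant", v2),
                     ("mixed_pattern", v3 ++ [w]), ("displacement_dominant", v4)] := by
  simp [PySem.Dict.modify, PySem.Dict.insert, PySem.Dict.getD, PySem.Dict.get?]

theorem pv_modify_dis (v1 v2 v3 v4 : List (List (String × List (String × Int))))
    (w : List (String × List (String × Int))) :
    (PySem.Dict.mk [("liquidity_dominant", v1), ("fvg_dominant", v2),
                    ("mixed_pattern", v3), ("displacement_dominant", v4)]).modify
      "displacement_dominant" [] (· ++ [w])
    = PySem.Dict.mk [("liquidity_dominant", v1), ("fvg_dominant", v2),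
                     ("mixed_pattern", v3), ("displacement_dominant", v4 ++ [w])] := by
  simp [PySem.Dict.modify, PySem.Dict.insert, PySem.Dict.getD, PySem.Dict.get?]

-- The fold over the seeded four-key dict, characterised: each bucket is its seed
-- followed by the sequences classified to it, in input order.
theorem pv_fold_items (xs : List (List (String × List (String × Int))))
    (v1 v2 v3 v4 : List (List (String × List (String × Int)))) :
    (xs.foldl (fun g s => g.modify (pvAKey s) [] (· ++ [s]))
      (PySem.Dict.mk [("liquidity_dominant", v1), ("fvg_dominant", v2),
                      ("mixed_pattern", v3), ("displacement_dominant", v4)])).items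
    = [("liquidity_dominant", v1 ++ xs.filter (fun s => pvAKey s == "liquidity_dominant")),
       ("fvg_dominant", v2 ++ xs.filter (fun s => pvAKey s == "fvg_dominant")),
       ("mixed_pattern", v3 ++ xs.filter (fun s => pvAKey s == "mixed_pattern")),
       ("displacement_dominant", v4 ++ xs.filter (fun s => pvAKey s == "displacement_dominant"))] := by
  induction xs generalizing v1 v2 v3 v4 with
  | nil => simp
  | cons x t ih =>
      rcases pvAKey_cases x with hk | hk | hk | hk <;>
        simp only [List.foldl_cons, hk, pv_modify_liq, pv_modify_fvg, pv_modify_mix,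
                   pv_modify_dis, ih, List.filter_cons] <;>
        simp

-- ===== VERDICT (by name: the statement is the Claim_ definition above) =====
theorem group_similar_sequences_py_spec : Claim_equal_group_similar_sequences_py := by
  intro sequences hdom
  clear hdom
  unfold Spec_group_similar_sequences_py group_similar_sequences_py group_similar_sequences_py_alt
  dsimp only
  have hstep : (fun (groups : PySem.Dict String (List (List (String × List (String × Int)))))
      (seq : List (String × List (String × Int))) =>
      let metrics := pvMetricsOf seq
      let liquidity_count := pvCountOf metrics "liquidity_events_count"
      let fvg_count := pvCountOf metrics "fvg_events_count"
      let displacement_count := pvCountOf metrics "displacement_events_count"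
      if liquidity_count > fvg_count ∧ liquidity_count > displacement_count then
        groups.modify "liquidity_dominant" [] (· ++ [seq])
      else if fvg_count > liquidity_count ∧ fvg_count > displacement_count then
        groups.modify "fvg_dominant" [] (· ++ [seq])
      else if displacement_count > liquidity_count ∧ displacement_count > fvg_count then
        groups.modify "displacement_dominant" [] (· ++ [seq])
      else
        groups.modify "mixed_pattern" [] (· ++ [seq]))
      = (fun g s => g.modify (pvAKey s) [] (· ++ [s])) := by
    funext g s
    exact pv_stepA g s
  rw [hstep, pv_fold_items]
  simp only [List.nil_append]
  have hc : ∀ k : String, (fun s => pvAKey s == k) = (fun s => pvClassify s == k) := by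
    intro k; funext s; rw [pvClassify_eq_pvAKey]
  rw [hc, hc, hc, hc]
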